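-- pv_equiv track=rewrite | github.com/ZhuKerui/LongDoc | script/retrieval/sci_review/paper.py | extract_fixed_text
-- ===== SOURCE A (Python) =====
-- def extract_fixed_text(source_text:str, fixed_text:str, from_start:bool=True):
--     fixed_text = ''.join(fixed_text.split()).lower()
--     if not fixed_text or not source_text or len(fixed_text) > len(''.join(source_text.split())):
--         return ''
--
--     source_text = source_text if from_start else source_text[::-1]
--     fixed_text = fixed_text if from_start else fixed_text[::-1]
--     extracted_text = ''
--
--     fixed_char_idx = 0
--     for source_char_idx, source_char in enumerate(source_text):
--         if source_char.isspace():
--             continue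
--         if source_char.lower() == fixed_text[fixed_char_idx]:
--             fixed_char_idx += 1
--             if fixed_char_idx == len(fixed_text):
--                 extracted_text = source_text[:source_char_idx+1]
--                 break
--         else:
--             break
--     return extracted_text if from_start else extracted_text[::-1]
-- ===== SOURCE B (Python) =====
-- def extract_fixed_text(source_text: str, fixed_text: str, from_start: bool = True):
--     fixed = ''.join(fixed_text.split()).lower()
--     src = source_text if from_start else source_text[::-1]
--     if not from_start:
--         fixed = fixed[::-1]
--     table = [(i, c.lower()) for i, c in enumerate(src) if not c.isspace()]
--     if not fixed or not source_text or len(fixed) > len(table):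
--         return ''
--     if ''.join(c for _, c in table[:len(fixed)]) != fixed:
--         return ''
--     out = src[:table[len(fixed) - 1][0] + 1]
--     return out if from_start else out[::-1]
-- ===== Notes on version B (the rewrite author's own statement) =====
-- stated objective: alternative
-- what changed: Replaces A's stateful scan (index counter, skip/continue, two break exits) by building an index table of (position, lowered char) for the non-whitespace characters once, then deciding the match by comparing the table's prefix with fixed_text and slicing at the recorded position.
import Mathlib
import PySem

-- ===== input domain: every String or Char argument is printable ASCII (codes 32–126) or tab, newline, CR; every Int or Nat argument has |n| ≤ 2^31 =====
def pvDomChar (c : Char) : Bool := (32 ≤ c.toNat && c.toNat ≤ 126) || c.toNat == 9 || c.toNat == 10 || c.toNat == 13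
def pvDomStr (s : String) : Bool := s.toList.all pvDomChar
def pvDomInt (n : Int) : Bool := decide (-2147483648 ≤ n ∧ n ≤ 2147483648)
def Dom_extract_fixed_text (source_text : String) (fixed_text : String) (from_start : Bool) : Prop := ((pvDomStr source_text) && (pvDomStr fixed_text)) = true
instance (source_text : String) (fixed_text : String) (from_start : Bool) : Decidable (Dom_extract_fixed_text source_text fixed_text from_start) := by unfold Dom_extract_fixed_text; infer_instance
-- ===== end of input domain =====

-- B replaces A's stateful character-by-character scan by a precomputed index table of the
-- non-whitespace characters plus a prefix comparison and one slice (objective: alternative).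

-- ===== PORT A =====
-- the for-loop of A: i = source_char_idx, fidx = fixed_char_idx, rest = the unprocessed suffix
-- of source_text; fixed.getD fidx ' ' is fixed_text[fixed_char_idx] (always in range: the length
-- guard ran before the loop); src.take (i+1) is source_text[:source_char_idx+1] (nonneg bounds).
def pvGoA (fixed src : List Char) : Nat → Nat → List Char → List Char
  | _, _, [] => []
  | i, fidx, c :: rest =>
    if PySem.Chars.isspace c then pvGoA fixed src (i+1) fidx rest
    else if PySem.Chars.lowerChar c = fixed.getD fidx ' ' then
      if fidx + 1 = fixed.length then src.take (i+1)
      else pvGoA fixed src (i+1) (fidx+1) rest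
    else []

def extract_fixed_text (source_text : String) (fixed_text : String) (from_start : Bool) : String :=
  let fixed := PySem.Chars.lower (PySem.Chars.join [] (PySem.Chars.split₀ fixed_text.toList))
  if fixed.isEmpty || source_text.toList.isEmpty
      || (PySem.Chars.join [] (PySem.Chars.split₀ source_text.toList)).length < fixed.length then ""
  else
    -- s[::-1] is reversal (PySem.List.slice?_none_none_neg_one)
    let src := if from_start then source_text.toList else source_text.toList.reverse
    let fixed' := if from_start then fixed else fixed.reverse
    let extracted := pvGoA fixed' src 0 0 src
    String.ofList (if from_start then extracted else extracted.reverse)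

-- ===== PORT B =====
def extract_fixed_text_alt (source_text : String) (fixed_text : String) (from_start : Bool) : String :=
  let fixed0 := PySem.Chars.lower (PySem.Chars.join [] (PySem.Chars.split₀ fixed_text.toList))
  -- s[::-1] is reversal (PySem.List.slice?_none_none_neg_one)
  let src := if from_start then source_text.toList else source_text.toList.reverse
  let fixed := if from_start then fixed0 else fixed0.reverse
  let table := ((PySem.List.enumerate src 0).filter (fun p => !PySem.Chars.isspace p.2)).map
      (fun p => (p.1, PySem.Chars.lowerChar p.2))
  if fixed.isEmpty || source_text.toList.isEmpty || table.length < fixed.length then ""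
  else if (table.take fixed.length).map Prod.snd ≠ fixed then ""
  else
    -- table[len(fixed)-1][0] is in range (the length guard above), hence getD/toNat are exact
    let out := src.take ((table.getD (fixed.length - 1) (0, ' ')).1.toNat + 1)
    String.ofList (if from_start then out else out.reverse)

-- ===== PRECONDITION & SPEC =====
def Spec_extract_fixed_text (source_text : String) (fixed_text : String) (from_start : Bool) (out : String) : Prop := out = extract_fixed_text_alt source_text fixed_text from_start
instance (source_text : String) (fixed_text : String) (from_start : Bool) (out : String) : Decidable (Spec_extract_fixed_text source_text fixed_text from_start out) := by unfold Spec_extract_fixed_text; infer_instance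

-- ===== CLAIM (what is proved, stated in full; the proofs are below) =====
def Claim_equal_extract_fixed_text : Prop := ∀ (source_text : String) (fixed_text : String) (from_start : Bool), Dom_extract_fixed_text source_text fixed_text from_start → Spec_extract_fixed_text source_text fixed_text from_start (extract_fixed_text source_text fixed_text from_start)

-- ===== LEMMAS AND PROOFS =====

-- Nat-indexed version of B's table, convenient for induction
def pvTblN (i : Nat) : List Char → List (Nat × Char)
  | [] => []
  | c :: rest =>
    if PySem.Chars.isspace c then pvTblN (i+1) rest
    else (i, PySem.Chars.lowerChar c) :: pvTblN (i+1) rest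

lemma pvTblN_eq_enum (rest : List Char) : ∀ i : Nat,
    ((PySem.List.enumerate rest (i : Int)).filter (fun p => !PySem.Chars.isspace p.2)).map
        (fun p => (p.1, PySem.Chars.lowerChar p.2))
      = (pvTblN i rest).map (fun p => ((p.1 : Int), p.2)) := by
  induction rest with
  | nil => intro i; simp [pvTblN, PySem.List.enumerate_nil]
  | cons c rest ih =>
    intro i
    have h := ih (i + 1)
    by_cases hs : PySem.Chars.isspace c
    · simpa [pvTblN, PySem.List.enumerate_cons, hs] using h
    · simpa [pvTblN, PySem.List.enumerate_cons, hs] using h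

lemma pvTblN_len (rest : List Char) : ∀ i,
    (pvTblN i rest).length = (rest.filter (fun c => !PySem.Chars.isspace c)).length := by
  induction rest with
  | nil => intro i; simp [pvTblN]
  | cons c rest ih =>
    intro i
    by_cases hs : PySem.Chars.isspace c <;> simp [pvTblN, hs, ih]

-- ''.join(s.split()) deletes exactly the whitespace
lemma pvJoinSplitGo (rest : List Char) : ∀ cur acc,
    (PySem.Chars.split₀.go rest cur acc).flatten
      = acc.reverse.flatten ++ cur.reverse ++ rest.filter (fun c => !PySem.Chars.isspace c) := by
  induction rest with
  | nil =>
    intro cur acc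
    by_cases hc : cur.isEmpty
    · simp [PySem.Chars.split₀.go, List.isEmpty_iff.mp hc]
    · simp [PySem.Chars.split₀.go, hc]
  | cons c rest ih =>
    intro cur acc
    by_cases hs : PySem.Chars.isspace c
    · by_cases hc : cur.isEmpty
      · simp [PySem.Chars.split₀.go, hs, ih, List.isEmpty_iff.mp hc]
      · simp [PySem.Chars.split₀.go, hs, hc, ih]
    · simp [PySem.Chars.split₀.go, hs, ih]

lemma pvJoinSplit (s : List Char) :
    PySem.Chars.join [] (PySem.Chars.split₀ s) = s.filter (fun c => !PySem.Chars.isspace c) := by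
  have h : ([] : List Char).intercalate (PySem.Chars.split₀ s) = (PySem.Chars.split₀ s).flatten := by
    simp [List.intercalate]
    induction PySem.Chars.split₀ s with
    | nil => simp
    | cons a l ih => cases l <;> simp_all [List.intersperse]
  simpa [PySem.Chars.join, h] using pvJoinSplitGo s [] []

-- the main loop invariant: A's scan equals B's table test on the unprocessed suffix
lemma pvGoA_spec (fixed src : List Char) (rest : List Char) : ∀ i fidx, fidx < fixed.length →
    pvGoA fixed src i fidx rest =
      (if fixed.length - fidx ≤ (pvTblN i rest).length ∧
          ((pvTblN i rest).take (fixed.length - fidx)).map Prod.snd = fixed.drop fidx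
       then src.take (((pvTblN i rest).getD (fixed.length - fidx - 1) (0, ' ')).1 + 1)
       else []) := by
  induction rest with
  | nil =>
    intro i fidx hf
    have hno : ¬ (fixed.length - fidx ≤ (pvTblN i ([] : List Char)).length ∧
        ((pvTblN i ([] : List Char)).take (fixed.length - fidx)).map Prod.snd = fixed.drop fidx) := by
      rintro ⟨h1, -⟩
      simp [pvTblN] at h1
      omega
    rw [if_neg hno]
    rfl
  | cons c rest ih =>
    intro i fidx hf
    have hdrop : fixed.drop fidx = fixed.getD fidx ' ' :: fixed.drop (fidx + 1) := by
      rw [List.getD_eq_getElem _ _ hf, List.drop_eq_getElem_cons hf]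
    by_cases hs : PySem.Chars.isspace c
    · rw [show pvGoA fixed src i fidx (c :: rest) = pvGoA fixed src (i+1) fidx rest by
        simp only [pvGoA]; rw [if_pos hs]]
      rw [ih (i+1) fidx hf]
      rw [show pvTblN i (c :: rest) = pvTblN (i+1) rest by simp only [pvTblN]; rw [if_pos hs]]
    · have hcons : pvTblN i (c :: rest) = (i, PySem.Chars.lowerChar c) :: pvTblN (i+1) rest := by
        simp only [pvTblN]; rw [if_neg hs]
      by_cases hm : PySem.Chars.lowerChar c = fixed.getD fidx ' '
      · by_cases hlast : fidx + 1 = fixed.length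
        · have h1 : fixed.length - fidx = 1 := by omega
          have hyes : fixed.length - fidx ≤ (pvTblN i (c :: rest)).length ∧
              ((pvTblN i (c :: rest)).take (fixed.length - fidx)).map Prod.snd = fixed.drop fidx := by
            constructor
            · rw [hcons, h1]; simp
            · rw [hcons, hdrop, h1]
              have h2 : fixed.drop (fidx + 1) = [] := List.drop_eq_nil_of_le (by omega)
              simp [h2, hm]
          rw [show pvGoA fixed src i fidx (c :: rest) = src.take (i+1) by
            simp only [pvGoA]; rw [if_neg hs, if_pos hm, if_pos hlast]]
          rw [if_pos hyes, hcons, h1]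
          rfl
        · have hf' : fidx + 1 < fixed.length := by omega
          rw [show pvGoA fixed src i fidx (c :: rest) = pvGoA fixed src (i+1) (fidx+1) rest by
            simp only [pvGoA]; rw [if_neg hs, if_pos hm, if_neg hlast]]
          rw [ih (i+1) (fidx+1) hf', hcons, hdrop]
          have hlen : fixed.length - fidx = (fixed.length - (fidx + 1)) + 1 := by omega
          rw [hlen]
          by_cases hc : fixed.length - (fidx + 1) ≤ (pvTblN (i+1) rest).length ∧
              ((pvTblN (i+1) rest).take (fixed.length - (fidx + 1))).map Prod.snd = fixed.drop (fidx + 1)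
          · have hyes : fixed.length - (fidx + 1) + 1 ≤
                ((i, PySem.Chars.lowerChar c) :: pvTblN (i+1) rest).length ∧
                (((i, PySem.Chars.lowerChar c) :: pvTblN (i+1) rest).take
                    (fixed.length - (fidx + 1) + 1)).map Prod.snd
                  = fixed.getD fidx ' ' :: fixed.drop (fidx + 1) := by
              constructor
              · simp; omega
              · rw [List.take_succ_cons]
                simp [hm, hc.2]
            rw [if_pos hc, if_pos hyes]
            have hk : fixed.length - (fidx + 1) + 1 - 1 = (fixed.length - (fidx + 1) - 1) + 1 := by
              omega
            rw [hk, List.getD_cons_succ]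
          · have hno : ¬ (fixed.length - (fidx + 1) + 1 ≤
                ((i, PySem.Chars.lowerChar c) :: pvTblN (i+1) rest).length ∧
                (((i, PySem.Chars.lowerChar c) :: pvTblN (i+1) rest).take
                    (fixed.length - (fidx + 1) + 1)).map Prod.snd
                  = fixed.getD fidx ' ' :: fixed.drop (fidx + 1)) := by
              rintro ⟨h1, h2⟩
              rw [List.take_succ_cons, List.map_cons] at h2
              injection h2 with hh ht
              simp at h1
              exact hc ⟨by omega, ht⟩
            rw [if_neg hc, if_neg hno]
      · rw [show pvGoA fixed src i fidx (c :: rest) = [] by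
          simp only [pvGoA]; rw [if_neg hs, if_neg hm]]
        have hno : ¬ (fixed.length - fidx ≤ (pvTblN i (c :: rest)).length ∧
            ((pvTblN i (c :: rest)).take (fixed.length - fidx)).map Prod.snd = fixed.drop fidx) := by
          rintro ⟨h1, h2⟩
          have hpos : fixed.length - fidx = (fixed.length - fidx - 1) + 1 := by omega
          rw [hcons, hdrop, hpos, List.take_succ_cons, List.map_cons] at h2
          injection h2 with hh ht
          exact hm hh
        rw [if_neg hno]

-- ===== VERDICT (by name: the statement is the Claim_ definition above) =====
theorem extract_fixed_text_spec : Claim_equal_extract_fixed_text := by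
  intro source_text fixed_text from_start _
  unfold Spec_extract_fixed_text extract_fixed_text extract_fixed_text_alt
  simp only []
  set f0 := PySem.Chars.lower (PySem.Chars.join [] (PySem.Chars.split₀ fixed_text.toList)) with hf0
  set s0 := source_text.toList with hs0
  set src := if from_start then s0 else s0.reverse with hsrc
  set fx := if from_start then f0 else f0.reverse with hfx
  set tbl := ((PySem.List.enumerate src 0).filter (fun p => !PySem.Chars.isspace p.2)).map
      (fun p => (p.1, PySem.Chars.lowerChar p.2)) with htbl
  have h_tbl : tbl = (pvTblN 0 src).map (fun p => ((p.1 : Int), p.2)) := by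
    rw [htbl]
    exact_mod_cast pvTblN_eq_enum src 0
  have h_count : (pvTblN 0 src).length
      = (PySem.Chars.join [] (PySem.Chars.split₀ s0)).length := by
    rw [pvJoinSplit, pvTblN_len]
    rw [hsrc]
    by_cases h : from_start
    · simp [h]
    · simp [h, List.filter_reverse]
  have h_tlen : tbl.length = (PySem.Chars.join [] (PySem.Chars.split₀ s0)).length := by
    rw [h_tbl, List.length_map, h_count]
  have h_fxlen : fx.length = f0.length := by
    rw [hfx]; by_cases h : from_start <;> simp [h]
  have h_fxe : fx.isEmpty = f0.isEmpty := by
    rw [hfx]; by_cases h : from_start <;> simp [h]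
  by_cases hg : (f0.isEmpty || s0.isEmpty
      || decide ((PySem.Chars.join [] (PySem.Chars.split₀ s0)).length < f0.length)) = true
  · rw [if_pos hg, if_pos (show (fx.isEmpty || s0.isEmpty
        || decide (tbl.length < fx.length)) = true by rw [h_fxe, h_tlen, h_fxlen]; exact hg)]
  · rw [if_neg hg, if_neg (show ¬ (fx.isEmpty || s0.isEmpty
        || decide (tbl.length < fx.length)) = true by rw [h_fxe, h_tlen, h_fxlen]; exact hg)]
    simp only [Bool.or_eq_true, decide_eq_true_eq, not_or] at hg
    obtain ⟨⟨hfe, -⟩, hle⟩ := hg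
    have hne : f0 ≠ [] := by simpa [List.isEmpty_iff] using hfe
    have hpos : 0 < fx.length := by
      rw [h_fxlen]; exact List.length_pos_of_ne_nil hne
    have hlen : fx.length ≤ (pvTblN 0 src).length := by rw [h_fxlen, h_count]; omega
    rw [pvGoA_spec fx src src 0 0 hpos]
    simp only [Nat.sub_zero, List.drop_zero]
    have hsnd : (tbl.take fx.length).map Prod.snd
        = ((pvTblN 0 src).take fx.length).map Prod.snd := by
      rw [h_tbl, List.map_take.symm, List.map_map]
      rfl
    by_cases hmatch : ((pvTblN 0 src).take fx.length).map Prod.snd = fx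
    · rw [if_pos (show fx.length ≤ (pvTblN 0 src).length ∧
          ((pvTblN 0 src).take fx.length).map Prod.snd = fx from ⟨hlen, hmatch⟩)]
      rw [if_neg (show ¬ (tbl.take fx.length).map Prod.snd ≠ fx by
        rw [hsnd]; exact not_not_intro hmatch)]
      have hk : fx.length - 1 < (pvTblN 0 src).length := by omega
      have hidx : (tbl.getD (fx.length - 1) ((0 : Int), ' ')).1.toNat
          = ((pvTblN 0 src).getD (fx.length - 1) (0, ' ')).1 := by
        rw [h_tbl, List.getD_eq_getElem _ _ (by simpa using hk), List.getElem_map,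
          List.getD_eq_getElem _ _ hk]
        simp
      rw [hidx]
    · rw [if_neg (show ¬ (fx.length ≤ (pvTblN 0 src).length ∧
          ((pvTblN 0 src).take fx.length).map Prod.snd = fx) by
        rintro ⟨-, h2⟩; exact hmatch h2)]
      rw [if_pos (show (tbl.take fx.length).map Prod.snd ≠ fx by
        rw [hsnd]; exact hmatch)]
      cases from_start <;> rfl
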